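-- pv_equiv track=rewrite | github.com/Hydralune/EduNova | backend/rag/segmentor.py | min_concat_segments_optimized
-- ===== SOURCE A (Python) =====
-- from typing import List, Dict, Any, Tuple, Optional
--
-- def min_concat_segments_optimized(strings: List[str], max_length: int) -> List[str]:
--     """
--     使用动态规划和滑动窗口优化的字符串合并算法，确保分组数量最少。
--     """
--     n = len(strings)
--     lengths = [len(s) for s in strings]
--
--     for i, length in enumerate(lengths):
--         if length > max_length:
--             raise ValueError(f"第 {i+1} 个字符串的长度 ({length}) 超过了最大长度 ({max_length})")
--
--     dp = [float('inf')] * (n + 1)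
--     dp[0] = 0
--     prev = [-1] * (n + 1)
--
--     left = 0
--     total = 0
--     for right in range(1, n + 1):
--         total += lengths[right - 1]
--         while total > max_length and left < right - 1:
--             total -= lengths[left]
--             left += 1
--         dp[right] = dp[left] + 1
--         prev[right] = left
--
--     groups: List[Tuple[int, int]] = []
--     idx = n
--     while idx > 0:
--         start = prev[idx]
--         groups.append((start, idx - 1))
--         idx = start
--     groups.reverse()
--
--     result: List[str] = []
--     for start, end in groups:
--         result.append("".join(strings[start : end + 1]))
--     return result
-- ===== SOURCE B (Python) =====
-- from typing import List
--
-- def min_concat_segments_optimized(strings: List[str], max_length: int) -> List[str]: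
--     # Same validation as the original (same message, 1-based index).
--     for i, s in enumerate(strings):
--         if len(s) > max_length:
--             raise ValueError(f"第 {i+1} 个字符串的长度 ({len(s)}) 超过了最大长度 ({max_length})")
--     lengths = [len(s) for s in strings]
--     result: List[str] = []
--     i = len(strings) - 1
--     while i >= 0:
--         end = i
--         total = lengths[i]
--         i -= 1
--         while i >= 0 and total + lengths[i] <= max_length:
--             total += lengths[i]
--             i -= 1
--         result.append("".join(strings[i + 1 : end + 1]))
--     result.reverse()
--     return result
-- ===== Notes on version B (the rewrite author's own statement) =====
-- stated objective: simpler
-- what changed: Replaced the dp/prev arrays, the monotone sliding window and the backpointer reconstruction by a single right-to-left greedy pass that packs each group maximally from the right and joins it immediately.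
import Mathlib
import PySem

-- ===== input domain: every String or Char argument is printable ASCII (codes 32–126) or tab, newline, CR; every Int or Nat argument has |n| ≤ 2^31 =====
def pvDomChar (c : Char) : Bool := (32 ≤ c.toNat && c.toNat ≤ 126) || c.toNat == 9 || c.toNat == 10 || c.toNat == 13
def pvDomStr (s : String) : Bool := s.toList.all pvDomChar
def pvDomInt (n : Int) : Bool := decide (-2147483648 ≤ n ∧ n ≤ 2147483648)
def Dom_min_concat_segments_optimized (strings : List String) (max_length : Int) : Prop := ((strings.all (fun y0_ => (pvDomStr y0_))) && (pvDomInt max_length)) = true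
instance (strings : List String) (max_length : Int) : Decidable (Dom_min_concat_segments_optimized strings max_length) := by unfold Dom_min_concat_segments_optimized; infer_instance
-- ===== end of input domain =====

-- B replaces A's dp/prev sliding-window + backpointer reconstruction by a single right-to-left
-- greedy pass (simpler, same output; A's reconstruction is exactly the maximal suffix window).

-- ===== PORT A =====
-- inner `while total > max_length and left < right - 1` loop (fuel = right bounds its iterations)
def pvShrinkA (lengths : List Int) (maxL : Int) (right : Nat) : Nat → Nat × Int → Nat × Int
  | 0, st => st
  | fuel+1, (left, total) =>
    if maxL < total ∧ left < right - 1 then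
      pvShrinkA lengths maxL right fuel (left + 1, total - lengths.getD left 0)
    else (left, total)

-- `while idx > 0` backpointer walk (fuel = n bounds its iterations)
def pvReconA (prev : List Int) : Nat → Int → List (Int × Int)
  | 0, _ => []
  | fuel+1, idx =>
    if 0 < idx then
      (prev.getD idx.toNat (-1), idx - 1) :: pvReconA prev fuel (prev.getD idx.toNat (-1))
    else []

def min_concat_segments_optimized (strings : List String) (max_length : Int) : List String :=
  let n := strings.length
  let lengths := strings.map (fun s => PySem.Str.len s)
  if lengths.any (fun l => max_length < l) then [] -- Python raises ValueError here (excluded by Pre_)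
  else
    -- dp is dead for the result; float('inf') is ported as `none` (never read, as in the Python)
    let dp0 : List (Option Int) := (List.replicate (n+1) (none : Option Int)).set 0 (some 0)
    let prev0 : List Int := List.replicate (n+1) (-1)
    let st := (List.range' 1 n).foldl
      (fun (st : Nat × Int × List (Option Int) × List Int) right =>
        let total := st.2.1 + lengths.getD (right - 1) 0
        let lt := pvShrinkA lengths max_length right right (st.1, total)
        (lt.1, lt.2, st.2.2.1.set right ((st.2.2.1.getD lt.1 none).map (· + 1)),
          st.2.2.2.set right (lt.1 : Int)))
      (0, 0, dp0, prev0)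
    let groups := (pvReconA st.2.2.2 n (n : Int)).reverse
    groups.map (fun g => PySem.Str.join "" (PySem.List.slice strings (some g.1) (some (g.2 + 1))))

-- ===== PORT B =====
-- inner `while i >= 0 and total + lengths[i] <= max_length` loop (fuel = n bounds its iterations)
def pvExtendB (lengths : List Int) (maxL : Int) : Nat → Int → Int → Int
  | 0, i, _ => i
  | fuel+1, i, total =>
    if 0 ≤ i ∧ total + lengths.getD i.toNat 0 ≤ maxL then
      pvExtendB lengths maxL fuel (i - 1) (total + lengths.getD i.toNat 0)
    else i

-- outer `while i >= 0` loop (fuel = n bounds its iterations)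
def pvOuterB (strings : List String) (lengths : List Int) (maxL : Int) : Nat → Int → List String → List String
  | 0, _, acc => acc
  | fuel+1, i, acc =>
    if 0 ≤ i then
      let i2 := pvExtendB lengths maxL strings.length (i - 1) (lengths.getD i.toNat 0)
      pvOuterB strings lengths maxL fuel i2
        (acc ++ [PySem.Str.join "" (PySem.List.slice strings (some (i2 + 1)) (some (i + 1)))])
    else acc

def min_concat_segments_optimized_alt (strings : List String) (max_length : Int) : List String :=
  if strings.any (fun s => max_length < PySem.Str.len s) then [] -- Python raises ValueError here (excluded by Pre_)
  else
    let lengths := strings.map (fun s => PySem.Str.len s)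
    (pvOuterB strings lengths max_length strings.length ((strings.length : Int) - 1) []).reverse

-- ===== PRECONDITION & SPEC =====
-- Pre_ excludes exactly the inputs on which the Python A raises ValueError (some string longer
-- than max_length); B raises the identical error there.
def Pre_min_concat_segments_optimized (strings : List String) (max_length : Int) : Prop :=
  ∀ s ∈ strings, PySem.Str.len s ≤ max_length
instance (strings : List String) (max_length : Int) : Decidable (Pre_min_concat_segments_optimized strings max_length) := by unfold Pre_min_concat_segments_optimized; infer_instance

def pvWitness_min_concat_segments_optimized : List String × Int := (["ab", "c", "de"], 3)

def Spec_min_concat_segments_optimized (strings : List String) (max_length : Int) (out : List String) : Prop := out = min_concat_segments_optimized_alt strings max_length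
instance (strings : List String) (max_length : Int) (out : List String) : Decidable (Spec_min_concat_segments_optimized strings max_length out) := by unfold Spec_min_concat_segments_optimized; infer_instance

-- ===== CLAIM (what is proved, stated in full; the proofs are below) =====
def Claim_equal_min_concat_segments_optimized : Prop := ∀ (strings : List String) (max_length : Int), Dom_min_concat_segments_optimized strings max_length → Pre_min_concat_segments_optimized strings max_length → Spec_min_concat_segments_optimized strings max_length (min_concat_segments_optimized strings max_length)

-- ===== LEMMAS AND PROOFS =====

-- sum of lengths[l:r] (getD-based, so no bounds side conditions)
def pvSeg (L : List Int) (l r : Nat) : Int := ((List.Ico l r).map (fun i => L.getD i 0)).sum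

theorem pvSeg_empty (L : List Int) (l r : Nat) (h : r ≤ l) : pvSeg L l r = 0 := by
  simp [pvSeg, List.Ico.eq_nil_of_le h]

theorem pvSeg_split (L : List Int) (l m r : Nat) (h1 : l ≤ m) (h2 : m ≤ r) :
    pvSeg L l r = pvSeg L l m + pvSeg L m r := by
  simp [pvSeg, ← List.Ico.append_consecutive h1 h2]

theorem pvSeg_succ_right (L : List Int) (l r : Nat) (h : l ≤ r) :
    pvSeg L l (r+1) = pvSeg L l r + L.getD r 0 := by
  rw [pvSeg_split L l r (r+1) h (Nat.le_succ r)]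
  simp [pvSeg, List.Ico.succ_singleton]

theorem pvSeg_nonneg (L : List Int) (hL : ∀ x ∈ L, 0 ≤ x) (l r : Nat) : 0 ≤ pvSeg L l r := by
  apply List.sum_nonneg
  intro x hx
  simp only [List.mem_map] at hx
  obtain ⟨i, _, rfl⟩ := hx
  by_cases hi : i < L.length
  · have : L[i]?.getD 0 = L[i] := by simp [List.getElem?_eq_getElem hi]
    rw [List.getD_eq_getElem?_getD, this]
    exact hL _ (List.getElem_mem hi)
  · simp [List.getD_eq_getElem?_getD, List.getElem?_eq_none (by omega : L.length ≤ i)]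

theorem pvSeg_mono_left (L : List Int) (hL : ∀ x ∈ L, 0 ≤ x) (l1 l2 r : Nat) (h : l1 ≤ l2) :
    pvSeg L l2 r ≤ pvSeg L l1 r := by
  by_cases hr : l2 ≤ r
  · rw [pvSeg_split L l1 l2 r h hr]
    have := pvSeg_nonneg L hL l1 l2
    omega
  · rw [pvSeg_empty L l2 r (by omega)]
    exact pvSeg_nonneg L hL l1 r

theorem pvSeg_mono_right (L : List Int) (hL : ∀ x ∈ L, 0 ≤ x) (l r1 r2 : Nat) (h : r1 ≤ r2) :
    pvSeg L l r1 ≤ pvSeg L l r2 := by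
  by_cases hr : l ≤ r1
  · rw [pvSeg_split L l r1 r2 hr h]
    have := pvSeg_nonneg L hL r1 r2
    omega
  · rw [pvSeg_empty L l r1 (by omega)]
    exact pvSeg_nonneg L hL l r2

-- the canonical (greedy-maximal) window start for a group ending at r-1
def pvGood (L : List Int) (maxL : Int) (r l : Nat) : Prop :=
  l < r ∧ pvSeg L l r ≤ maxL ∧ (l = 0 ∨ maxL < pvSeg L (l-1) r)

theorem pvGood_unique (L : List Int) (hL : ∀ x ∈ L, 0 ≤ x) (maxL : Int) (r l1 l2 : Nat)
    (h1 : pvGood L maxL r l1) (h2 : pvGood L maxL r l2) : l1 = l2 := by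
  obtain ⟨ha1, hb1, hc1⟩ := h1
  obtain ⟨ha2, hb2, hc2⟩ := h2
  by_contra hne
  rcases Nat.lt_or_ge l1 l2 with h | h
  · rcases hc2 with rfl | hc2
    · omega
    · have := pvSeg_mono_left L hL l1 (l2-1) r (by omega)
      omega
  · have hlt : l2 < l1 := by omega
    rcases hc1 with rfl | hc1
    · omega
    · have := pvSeg_mono_left L hL l2 (l1-1) r (by omega)
      omega

theorem pvShrinkA_spec (L : List Int) (maxL : Int) (r : Nat) (hr : 1 ≤ r) :
    ∀ fuel left total, total = pvSeg L left r → left ≤ r - 1 → r ≤ fuel + left →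
    (left = 0 ∨ maxL < pvSeg L (left-1) r) →
    (pvShrinkA L maxL r fuel (left, total)).2 = pvSeg L (pvShrinkA L maxL r fuel (left, total)).1 r ∧
    (pvShrinkA L maxL r fuel (left, total)).1 ≤ r - 1 ∧
    ((pvShrinkA L maxL r fuel (left, total)).1 = 0 ∨ maxL < pvSeg L ((pvShrinkA L maxL r fuel (left, total)).1 - 1) r) ∧
    ((pvShrinkA L maxL r fuel (left, total)).2 ≤ maxL ∨ (pvShrinkA L maxL r fuel (left, total)).1 = r - 1) := by
  intro fuel
  induction fuel with
  | zero => intro left total h1 h2 h3 h4; omega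
  | succ f ih =>
    intro left total h1 h2 h3 h4
    by_cases hc : maxL < total ∧ left < r - 1
    · have hstep : pvShrinkA L maxL r (f+1) (left, total) =
          pvShrinkA L maxL r f (left + 1, total - L.getD left 0) := by
        simp only [pvShrinkA, if_pos hc]
      rw [hstep]
      have hsp : pvSeg L left r = L.getD left 0 + pvSeg L (left+1) r := by
        have := pvSeg_split L left (left+1) r (by omega) (by omega)
        have h1' := pvSeg_succ_right L left left (le_refl left)
        have h0 := pvSeg_empty L left left (le_refl left)
        omega
      apply ih (left+1) (total - L.getD left 0)
      · omega
      · omega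
      · omega
      · right
        have : (left + 1) - 1 = left := by omega
        rw [this]
        omega
    · have hstep : pvShrinkA L maxL r (f+1) (left, total) = (left, total) := by
        simp only [pvShrinkA, if_neg hc]
      rw [hstep]
      refine ⟨h1, h2, h4, ?_⟩
      by_cases hm : maxL < total
      · right; omega
      · left; omega

theorem pvExtendB_spec (L : List Int) (maxL : Int) (r : Nat) (hr : 1 ≤ r) :
    ∀ (fuel : Nat) (i total : Int), -1 ≤ i → i + 1 < r → total = pvSeg L (i+1).toNat r → total ≤ maxL →
    (i + 1 : Int) ≤ (fuel : Int) →
    -1 ≤ pvExtendB L maxL fuel i total ∧ pvExtendB L maxL fuel i total ≤ i ∧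
    pvGood L maxL r (pvExtendB L maxL fuel i total + 1).toNat := by
  intro fuel
  induction fuel with
  | zero =>
    intro i total h1 h2 h3 h4 h5
    have hi : i = -1 := by omega
    subst hi
    simp only [pvExtendB]
    have h0 : ((-1 : Int) + 1).toNat = 0 := rfl
    rw [h0] at h3
    refine ⟨le_refl _, le_refl _, ?_⟩
    rw [h0]
    exact ⟨by omega, by omega, Or.inl rfl⟩
  | succ f ih =>
    intro i total h1 h2 h3 h4 h5
    by_cases hc : 0 ≤ i ∧ total + L.getD i.toNat 0 ≤ maxL
    · have hstep : pvExtendB L maxL (f+1) i total =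
          pvExtendB L maxL f (i - 1) (total + L.getD i.toNat 0) := by
        simp only [pvExtendB, if_pos hc]
      rw [hstep]
      have htn : (i - 1 + 1).toNat = i.toNat := by omega
      have htn1 : (i + 1).toNat = i.toNat + 1 := by omega
      have hsp : pvSeg L i.toNat r = L.getD i.toNat 0 + pvSeg L (i.toNat + 1) r := by
        have := pvSeg_split L i.toNat (i.toNat + 1) r (by omega) (by omega)
        have h1' := pvSeg_succ_right L i.toNat i.toNat (le_refl _)
        have h0 := pvSeg_empty L i.toNat i.toNat (le_refl _)
        omega
      have hx : pvSeg L (i + 1).toNat r = pvSeg L (i.toNat + 1) r := by rw [htn1]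
      have hrec := ih (i - 1) (total + L.getD i.toNat 0) (by omega) (by omega)
        (by rw [htn]; omega) hc.2 (by omega)
      exact ⟨by omega, by omega, hrec.2.2⟩
    · have hstep : pvExtendB L maxL (f+1) i total = i := by
        simp only [pvExtendB, if_neg hc]
      rw [hstep]
      refine ⟨h1, le_refl i, by omega, ?_, ?_⟩
      · have : pvSeg L (i+1).toNat r = total := h3.symm
        omega
      · by_cases hi : 0 ≤ i
        · right
          have hlt : maxL < total + L.getD i.toNat 0 := by
            by_contra hno
            exact hc ⟨hi, by omega⟩
          have htn1 : (i + 1).toNat = i.toNat + 1 := by omega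
          have hsp : pvSeg L i.toNat r = L.getD i.toNat 0 + pvSeg L (i.toNat + 1) r := by
            have := pvSeg_split L i.toNat (i.toNat + 1) r (by omega) (by omega)
            have h1' := pvSeg_succ_right L i.toNat i.toNat (le_refl _)
            have h0 := pvSeg_empty L i.toNat i.toNat (le_refl _)
            omega
          have hx : pvSeg L (i + 1).toNat r = pvSeg L (i.toNat + 1) r := by rw [htn1]
          have : (i + 1).toNat - 1 = i.toNat := by omega
          rw [this]
          omega
        · left; omega

theorem pvFoldA_inv (L : List Int) (maxL : Int) (n : Nat)
    (hL : ∀ x ∈ L, 0 ≤ x) (hfit : ∀ i, i < n → L.getD i 0 ≤ maxL) (dp0 : List (Option Int)) :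
    ∀ k, k ≤ n →
    ∃ left total dp prev,
      (List.range' 1 k).foldl
        (fun (st : Nat × Int × List (Option Int) × List Int) right =>
          let total := st.2.1 + L.getD (right - 1) 0
          let lt := pvShrinkA L maxL right right (st.1, total)
          (lt.1, lt.2, st.2.2.1.set right ((st.2.2.1.getD lt.1 none).map (· + 1)),
            st.2.2.2.set right (lt.1 : Int)))
        (0, 0, dp0, List.replicate (n+1) (-1)) = (left, total, dp, prev) ∧
      left ≤ k - 1 ∧ total = pvSeg L left k ∧ (left = 0 ∨ maxL < pvSeg L (left - 1) k) ∧
      prev.length = n + 1 ∧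
      (∀ r, 1 ≤ r → r ≤ k → ∃ l : Nat, prev.getD r (-1) = (l : Int) ∧ pvGood L maxL r l) := by
  intro k
  induction k with
  | zero =>
    intro _
    refine ⟨0, 0, dp0, List.replicate (n+1) (-1), rfl, le_refl _, ?_, Or.inl rfl, ?_, ?_⟩
    · rw [pvSeg_empty L 0 0 (le_refl _)]
    · simp
    · intro r h1 h2; omega
  | succ k ih =>
    intro hk
    obtain ⟨left, total, dp, prev, heq, hle, htot, hmin, hlen, hchain⟩ := ih (by omega)
    rw [List.range'_1_concat, List.foldl_append, heq]
    simp only [List.foldl_cons, List.foldl_nil]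
    rw [show 1 + k = k + 1 from by omega]
    have hd1 : k + 1 - 1 = k := by omega
    rw [hd1]
    have htot' : total + L.getD k 0 = pvSeg L left (k+1) := by
      rw [pvSeg_succ_right L left k (by omega)]; omega
    have hsp := pvShrinkA_spec L maxL (k+1) (by omega) (k+1) left (total + L.getD k 0)
      htot' (by omega) (by omega)
      (by rcases hmin with h | h
          · exact Or.inl h
          · exact Or.inr (lt_of_lt_of_le h (pvSeg_mono_right L hL (left-1) k (k+1) (by omega))))
    set lt := pvShrinkA L maxL (k+1) (k+1) (left, total + L.getD k 0) with hlt
    obtain ⟨hs1, hs2, hs3, hs4⟩ := hsp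
    have hfitk : pvSeg L lt.1 (k+1) ≤ maxL := by
      rcases hs4 with h | h
      · omega
      · have h' : lt.1 = k := by omega
        rw [h'] at hs1 ⊢
        rw [pvSeg_succ_right L k k (le_refl _), pvSeg_empty L k k (le_refl _)] at hs1 ⊢
        have := hfit k (by omega)
        omega
    refine ⟨lt.1, lt.2, _, _, rfl, by omega, hs1, hs3, by simp [hlen], ?_⟩
    intro r h1 h2
    by_cases hr : r = k + 1
    · subst hr
      refine ⟨lt.1, ?_, ⟨by omega, hfitk, hs3⟩⟩
      rw [List.getD_eq_getElem?_getD, List.getElem?_set_self (by omega)]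
      rfl
    · obtain ⟨l, hl1, hl2⟩ := hchain r h1 (by omega)
      refine ⟨l, ?_, hl2⟩
      rw [List.getD_eq_getElem?_getD, List.getElem?_set_ne (by omega)]
      rw [List.getD_eq_getElem?_getD] at hl1
      exact hl1

theorem pvOuterB_acc (strings : List String) (L : List Int) (maxL : Int) :
    ∀ (fuel : Nat) (i : Int) (acc : List String),
      pvOuterB strings L maxL fuel i acc = acc ++ pvOuterB strings L maxL fuel i [] := by
  intro fuel
  induction fuel with
  | zero => intro i acc; simp [pvOuterB]
  | succ f ih =>
    intro i acc
    by_cases hc : 0 ≤ i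
    · simp only [pvOuterB, if_pos hc]
      rw [ih _ (acc ++ _), ih _ ([] ++ _)]
      simp
    · simp [pvOuterB, if_neg hc]

theorem pvBack (strings : List String) (L : List Int) (maxL : Int) (n : Nat)
    (hn : strings.length = n) (hL : ∀ x ∈ L, 0 ≤ x)
    (hfit : ∀ i, i < n → L.getD i 0 ≤ maxL) (prev : List Int)
    (hchain : ∀ r, 1 ≤ r → r ≤ n → ∃ l : Nat, prev.getD r (-1) = (l : Int) ∧ pvGood L maxL r l) :
    ∀ idx, idx ≤ n → ∀ fA fB : Nat, idx ≤ fA → idx ≤ fB →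
    (pvReconA prev fA (idx : Int)).map
        (fun g => PySem.Str.join "" (PySem.List.slice strings (some g.1) (some (g.2 + 1))))
      = pvOuterB strings L maxL fB ((idx : Int) - 1) [] := by
  intro idx
  induction idx using Nat.strong_induction_on with
  | _ idx IH =>
    intro hidx fA fB hfA hfB
    match idx, hidx with
    | 0, _ =>
      cases fA <;> cases fB <;>
        simp [pvReconA, pvOuterB]
    | (j+1), hidx =>
      obtain ⟨a, rfl⟩ : ∃ a, fA = a + 1 := ⟨fA - 1, by omega⟩
      obtain ⟨b, rfl⟩ : ∃ b, fB = b + 1 := ⟨fB - 1, by omega⟩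
      obtain ⟨l, hl1, hl2⟩ := hchain (j+1) (by omega) (by omega)
      -- A side
      have htoNat : ((j+1 : Nat) : Int).toNat = j + 1 := by omega
      have hA : pvReconA prev (a+1) ((j+1 : Nat) : Int) =
          ((l : Int), ((j+1 : Nat) : Int) - 1) :: pvReconA prev a (l : Int) := by
        simp only [pvReconA, if_pos (by omega : (0:Int) < ((j+1 : Nat) : Int))]
        rw [htoNat, hl1]
      -- B side
      have hge : (0:Int) ≤ ((j+1 : Nat) : Int) - 1 := by omega
      have hB : pvOuterB strings L maxL (b+1) (((j+1 : Nat) : Int) - 1) [] =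
          pvOuterB strings L maxL b
            (pvExtendB L maxL strings.length ((((j+1 : Nat) : Int) - 1) - 1)
              (L.getD (((j+1 : Nat) : Int) - 1).toNat 0))
            ([] ++ [PySem.Str.join "" (PySem.List.slice strings
              (some (pvExtendB L maxL strings.length ((((j+1 : Nat) : Int) - 1) - 1)
                (L.getD (((j+1 : Nat) : Int) - 1).toNat 0) + 1))
              (some ((((j+1 : Nat) : Int) - 1) + 1)))]) := by
        simp only [pvOuterB, if_pos hge]
      have htn2 : (((j+1 : Nat) : Int) - 1).toNat = j := by omega
      have hsegj : L.getD j 0 = pvSeg L j (j+1) := by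
        rw [pvSeg_succ_right L j j (le_refl _), pvSeg_empty L j j (le_refl _)]
        omega
      have hext := pvExtendB_spec L maxL (j+1) (by omega) strings.length
        ((((j+1 : Nat) : Int) - 1) - 1) (L.getD j 0)
        (by omega) (by omega)
        (by rw [show (((j+1 : Nat) : Int) - 1 - 1 + 1).toNat = j from by omega]; exact hsegj)
        (hfit j (by omega)) (by omega)
      rw [hA, hB, htn2, List.map_cons]
      set i2 := pvExtendB L maxL strings.length ((((j+1 : Nat) : Int) - 1) - 1) (L.getD j 0)
        with hi2
      obtain ⟨he1, he2, he3⟩ := hext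
      have hleq : (i2 + 1).toNat = l := pvGood_unique L hL maxL (j+1) _ l he3 hl2
      have hi2l : i2 = (l : Int) - 1 := by omega
      have hgood : l < j + 1 := hl2.1
      rw [hi2l]
      rw [pvOuterB_acc strings L maxL b ((l : Int) - 1)]
      have harg : ((l : Int) - 1 + 1) = (l : Int) := by omega
      simp only [List.nil_append, List.cons_append, harg]
      rw [IH l hgood (by omega) a b (by omega) (by omega)]

theorem pvMain (strings : List String) (max_length : Int)
    (hpre : ∀ s ∈ strings, PySem.Str.len s ≤ max_length) :
    min_concat_segments_optimized strings max_length = min_concat_segments_optimized_alt strings max_length := by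
  have hL : ∀ x ∈ strings.map (fun s => PySem.Str.len s), 0 ≤ x := by
    intro x hx
    simp only [List.mem_map] at hx
    obtain ⟨t, _, rfl⟩ := hx
    simp [PySem.Str.len_eq]
  have hfit : ∀ i, i < strings.length →
      (strings.map (fun s => PySem.Str.len s)).getD i 0 ≤ max_length := by
    intro i hi
    rw [List.getD_eq_getElem?_getD, List.getElem?_map, List.getElem?_eq_getElem hi]
    exact hpre _ (List.getElem_mem hi)
  have hany : ((strings.map (fun s => PySem.Str.len s)).any fun l => decide (max_length < l))
      = false := by
    rw [List.any_eq_false]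
    intro x hx
    simp only [List.mem_map] at hx
    obtain ⟨t, ht, rfl⟩ := hx
    simpa using not_lt.mpr (hpre t ht)
  have hany' : (strings.any fun s => decide (max_length < PySem.Str.len s)) = false := by
    rw [List.any_eq_false]
    intro t ht
    simpa using not_lt.mpr (hpre t ht)
  obtain ⟨left, total, dp, prev, heq, _, _, _, _, hchain⟩ :=
    pvFoldA_inv (strings.map (fun s => PySem.Str.len s)) max_length strings.length hL hfit
      ((List.replicate (strings.length + 1) (none : Option Int)).set 0 (some 0))
      strings.length (le_refl _)
  unfold min_concat_segments_optimized min_concat_segments_optimized_alt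
  simp only [hany, hany', Bool.false_eq_true, if_false, heq]
  rw [List.map_reverse]
  congr 1
  exact pvBack strings (strings.map (fun s => PySem.Str.len s)) max_length strings.length rfl hL
    hfit prev hchain strings.length (le_refl _) strings.length strings.length (le_refl _)
    (le_refl _)

-- ===== VERDICT (by name: the statement is the Claim_ definition above) =====
theorem min_concat_segments_optimized_spec : Claim_equal_min_concat_segments_optimized := by
  intro strings max_length _ hpre
  exact pvMain strings max_length hpre
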